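-- pv_equiv track=rewrite | github.com/SodaVolcano/leetcode-grind | solutions/2120.execution-of-all-suffix-instructions-staying-in-a-grid.py | executeInstructions
-- ===== SOURCE A (Python) =====
-- from typing import List
--
-- def executeInstructions(n: int, startPos: List[int], s: str) -> List[int]:
--     # Brute force >:(
--     ans = [0 for _ in range(len(s))]
--
--     for i in range(len(s)):
--         start = startPos[::]
--
--         for direction in s[i:]:
--             match direction:
--                 case "U":
--                     start[0] -= 1
--                 case "D":
--                     start[0] += 1
--                 case "R":
--                     start[1] += 1
--                 case "L":
--                     start[1] -= 1
--
--             if start[0] >= 0 and start[0] < n and start[1] >= 0 and start[1] < n: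
--                 ans[i] += 1
--             else:
--                 break
--     return ans
-- ===== SOURCE B (Python) =====
-- from typing import List
--
-- def executeInstructions(n: int, startPos: List[int], s: str) -> List[int]:
--     # O(m): prefix sums of offsets + first-occurrence index maps (no per-suffix simulation).
--     m = len(s)
--     if m == 0:
--         return []
--     r, c = startPos[0], startPos[1]
--     DR = {"U": -1, "D": 1}
--     DC = {"L": -1, "R": 1}
--     R = [0] * (m + 1)
--     C = [0] * (m + 1)
--     for k, ch in enumerate(s):
--         R[k + 1] = R[k] + DR.get(ch, 0)
--         C[k + 1] = C[k] + DC.get(ch, 0)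
--
--     # first j>i with offset >= T happens exactly at the first j>i whose offset
--     # lies in [max(T,-1), max(T,1)] (steps change offsets by at most 1);
--     # symmetrically for <= U with [min(U,-1), min(U,1)].
--     def targets_ge(T):
--         return range(max(T, -1), max(T, 1) + 1)
--
--     def targets_le(U):
--         return range(min(U, -1), min(U, 1) + 1)
--
--     row_ts = list(targets_ge(n - r)) + list(targets_le(-r - 1))
--     col_ts = list(targets_ge(n - c)) + list(targets_le(-c - 1))
--
--     firstR = {}
--     firstC = {}
--     ans = [0] * m
--     for i in range(m - 1, -1, -1):
--         firstR[R[i + 1]] = i + 1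
--         firstC[C[i + 1]] = i + 1
--         cands = [firstR[R[i] + t] for t in row_ts if R[i] + t in firstR]
--         cands += [firstC[C[i] + t] for t in col_ts if C[i] + t in firstC]
--         ans[i] = (min(cands) - i - 1) if cands else m - i
--     return ans
-- ===== Notes on version B (the rewrite author's own statement) =====
-- stated objective: faster
-- what changed: A re-simulates the whole walk for every suffix; B computes prefix sums of the row/column offsets once and, scanning right-to-left, finds each suffix's first boundary crossing by O(1) lookups in first-occurrence dictionaries of prefix-sum values (a step changes an offset by at most 1, so the first exit hits one of at most 6 fixed target offsets).
-- outside the precondition, e.g. on executeInstructions(-1, [0], 'c'): A returns [0], B raises IndexError; on executeInstructions(2, [0], 'UD'): A raises IndexError, B raises IndexError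
import Mathlib
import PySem

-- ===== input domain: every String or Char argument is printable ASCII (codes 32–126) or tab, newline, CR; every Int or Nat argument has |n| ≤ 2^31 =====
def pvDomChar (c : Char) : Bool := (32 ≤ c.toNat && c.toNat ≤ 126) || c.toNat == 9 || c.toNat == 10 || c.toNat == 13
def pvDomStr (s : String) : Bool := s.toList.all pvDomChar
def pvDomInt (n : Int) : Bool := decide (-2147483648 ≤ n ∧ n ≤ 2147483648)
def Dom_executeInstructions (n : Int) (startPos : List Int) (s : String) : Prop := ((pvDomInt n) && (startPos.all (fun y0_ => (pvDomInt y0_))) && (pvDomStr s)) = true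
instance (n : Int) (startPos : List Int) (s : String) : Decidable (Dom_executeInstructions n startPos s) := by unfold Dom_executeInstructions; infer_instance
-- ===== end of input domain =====

-- B replaces A's per-suffix re-simulation by one pass over prefix sums of the
-- offsets with first-occurrence index maps (O(m) instead of O(m^2)); return
-- values agree, A's in-place list mutations are internal only.

-- ===== PORT A =====
def pvMove (d : Char) (st : List Int) : List Int :=
  if d = 'U' then PySem.List.pySetD st 0 (PySem.List.pyGetD st 0 0 - 1)
  else if d = 'D' then PySem.List.pySetD st 0 (PySem.List.pyGetD st 0 0 + 1)
  else if d = 'R' then PySem.List.pySetD st 1 (PySem.List.pyGetD st 1 0 + 1)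
  else if d = 'L' then PySem.List.pySetD st 1 (PySem.List.pyGetD st 1 0 - 1)
  else st

def pvAInner (n : Int) (st : List Int) : List Char → Int
  | [] => 0
  | d :: rest =>
    let st' := pvMove d st
    if 0 ≤ PySem.List.pyGetD st' 0 0 ∧ PySem.List.pyGetD st' 0 0 < n
        ∧ 0 ≤ PySem.List.pyGetD st' 1 0 ∧ PySem.List.pyGetD st' 1 0 < n
    then 1 + pvAInner n st' rest else 0

def executeInstructions (n : Int) (startPos : List Int) (s : String) : List Int :=
  let cs := s.toList
  (List.range cs.length).map (fun i => pvAInner n startPos (cs.drop i))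

-- ===== PORT B =====
def pvDr (c : Char) : Int := if c = 'U' then -1 else if c = 'D' then 1 else 0
def pvDc (c : Char) : Int := if c = 'L' then -1 else if c = 'R' then 1 else 0

def pvTargetsGe (T : Int) : List Int := PySem.List.pyRange (max T (-1)) (max T 1 + 1) 1
def pvTargetsLe (U : Int) : List Int := PySem.List.pyRange (min U (-1)) (min U 1 + 1) 1

def pvBLoop (m : Nat) (R C rowTs colTs : List Int) :
    Nat → PySem.Dict Int Int → PySem.Dict Int Int → List Int → List Int
  | 0, _, _, acc => acc
  | k + 1, fR, fC, acc =>
    let fR' := fR.insert (R.getD (k+1) 0) ((k : Int) + 1)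
    let fC' := fC.insert (C.getD (k+1) 0) ((k : Int) + 1)
    let cands := rowTs.filterMap (fun t => fR'.get? (R.getD k 0 + t))
              ++ colTs.filterMap (fun t => fC'.get? (C.getD k 0 + t))
    let a : Int := match PySem.List.min? cands (fun j => j) with
      | some j => j - (k : Int) - 1
      | none => (m : Int) - (k : Int)
    pvBLoop m R C rowTs colTs k fR' fC' (a :: acc)

def executeInstructions_alt (n : Int) (startPos : List Int) (s : String) : List Int :=
  let cs := s.toList
  let m := cs.length
  if m = 0 then []
  else
    let r := PySem.List.pyGetD startPos 0 0
    let c := PySem.List.pyGetD startPos 1 0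
    let R := cs.scanl (fun a ch => a + pvDr ch) 0
    let C := cs.scanl (fun a ch => a + pvDc ch) 0
    let rowTs := pvTargetsGe (n - r) ++ pvTargetsLe (-r - 1)
    let colTs := pvTargetsGe (n - c) ++ pvTargetsLe (-c - 1)
    pvBLoop m R C rowTs colTs m PySem.Dict.empty PySem.Dict.empty []

-- ===== PRECONDITION & SPEC =====
-- Pre_ excludes non-empty instruction strings with fewer than two start
-- coordinates: there A usually raises IndexError reading start[1], except that
-- its short-circuited bounds check can fail on start[0] first, in which case A
-- returns an accidental value while B's coordinate unpacking raises.
def Pre_executeInstructions (n : Int) (startPos : List Int) (s : String) : Prop :=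
  s.toList.length = 0 ∨ 2 ≤ startPos.length
instance (n : Int) (startPos : List Int) (s : String) : Decidable (Pre_executeInstructions n startPos s) := by unfold Pre_executeInstructions; infer_instance

def pvWitness_executeInstructions : Int × List Int × String := (3, [1, 2], "URDLLDX")

def Spec_executeInstructions (n : Int) (startPos : List Int) (s : String) (out : List Int) : Prop := out = executeInstructions_alt n startPos s
instance (n : Int) (startPos : List Int) (s : String) (out : List Int) : Decidable (Spec_executeInstructions n startPos s out) := by unfold Spec_executeInstructions; infer_instance

-- ===== CLAIM (what is proved, stated in full; the proofs are below) =====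
def Claim_equal_executeInstructions : Prop := ∀ (n : Int) (startPos : List Int) (s : String), Dom_executeInstructions n startPos s → Pre_executeInstructions n startPos s → Spec_executeInstructions n startPos s (executeInstructions n startPos s)

-- ===== LEMMAS AND PROOFS =====

-- proof-side abbreviations
def pvSum (g : Char → Int) (l : List Char) : Int := (l.map g).sum
def pvRf (g : Char → Int) (cs : List Char) (j : Nat) : Int := pvSum g (cs.take j)

def pvBad (n x y : Int) (cs : List Char) (i j : Nat) : Bool :=
  let D := pvRf pvDr cs j - pvRf pvDr cs i
  let E := pvRf pvDc cs j - pvRf pvDc cs i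
  !(decide (0 ≤ x + D) && decide (x + D < n) && decide (0 ≤ y + E) && decide (y + E < n))

def pvHit (n x y : Int) (cs : List Char) (i j : Nat) : Bool :=
  ((pvTargetsGe (n - x) ++ pvTargetsLe (-x - 1)).any
      (fun t => pvRf pvDr cs j == pvRf pvDr cs i + t)) ||
  ((pvTargetsGe (n - y) ++ pvTargetsLe (-y - 1)).any
      (fun t => pvRf pvDc cs j == pvRf pvDc cs i + t))

def pvBadStep (n x y : Int) (l : List Char) (k : Nat) : Bool :=
  let a := x + pvSum pvDr (l.take (k+1))
  let b := y + pvSum pvDc (l.take (k+1))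
  !(decide (0 ≤ a) && decide (a < n) && decide (0 ≤ b) && decide (b < n))

def pvBfun (n x y : Int) (cs : List Char) (m i : Nat) : Int :=
  match ((List.range' (i+1) (m - i)).find? (fun j => pvHit n x y cs i j)).map
      (fun j => (j : Int)) with
  | some jj => jj - (i : Int) - 1
  | none => (m : Int) - (i : Int)

def pvInv (Rl : List Int) (m k : Nat) (d : PySem.Dict Int Int) : Prop :=
  ∀ v : Int, d.get? v =
    ((List.range' (k+1) (m - k)).find? (fun j => Rl.getD j 0 == v)).map (fun j => (j : Int))

-- generic find? machinery
theorem pvFind?_congr {α : Type} (l : List α) (p q : α → Bool)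
    (h : ∀ a ∈ l, p a = q a) : l.find? p = l.find? q := by
  induction l with
  | nil => rfl
  | cons a l ih =>
    simp only [List.find?_cons]
    rw [h a (by simp)]
    cases q a
    · exact ih (fun b hb => h b (by simp [hb]))
    · rfl

theorem pvFind?_range'_some (p : Nat → Bool) (s len j : Nat) :
    (List.range' s len).find? p = some j ↔
      (s ≤ j ∧ j < s + len ∧ p j = true ∧ ∀ k, s ≤ k → k < j → p k = false) := by
  induction len generalizing s with
  | zero =>
    constructor
    · intro h; simp at h
    · rintro ⟨h1, h2, _⟩; omega
  | succ len ih =>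
    rw [List.range'_succ, List.find?_cons]
    cases hp : p s
    · rw [ih (s+1)]
      constructor
      · rintro ⟨h1, h2, h3, h4⟩
        exact ⟨by omega, by omega, h3, fun k hk1 hk2 => by
          rcases Nat.eq_or_lt_of_le hk1 with rfl | h
          · exact hp
          · exact h4 k h hk2⟩
      · rintro ⟨h1, h2, h3, h4⟩
        have hj : s ≠ j := by rintro rfl; rw [hp] at h3; cases h3
        exact ⟨by omega, by omega, h3, fun k hk1 hk2 => h4 k (by omega) hk2⟩
    · constructor
      · rintro ⟨rfl⟩
        exact ⟨le_refl _, by omega, hp, fun k hk1 hk2 => by omega⟩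
      · rintro ⟨h1, h2, h3, h4⟩
        rcases Nat.eq_or_lt_of_le h1 with rfl | h
        · rfl
        · exact absurd hp (by rw [h4 s (le_refl _) h]; simp)

theorem pvFind?_range'_none (p : Nat → Bool) (s len : Nat) :
    (List.range' s len).find? p = none ↔ ∀ k, s ≤ k → k < s + len → p k = false := by
  rw [List.find?_eq_none]
  constructor
  · intro h k h1 h2
    have := h k (by simp only [List.mem_range'_1]; omega)
    simpa using this
  · intro h a ha
    simp only [List.mem_range'_1] at ha
    simpa using h a ha.1 (by omega)

theorem pvFind?_range'_congr (s len : Nat) (p q : Nat → Bool)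
    (h1 : ∀ k, s ≤ k → k < s + len → q k = true → p k = true)
    (h2 : ∀ k, s ≤ k → k < s + len → p k = true →
        (∀ k', s ≤ k' → k' < k → p k' = false) → q k = true) :
    (List.range' s len).find? p = (List.range' s len).find? q := by
  cases hF : (List.range' s len).find? p with
  | none =>
    rw [pvFind?_range'_none] at hF
    rw [Eq.comm, pvFind?_range'_none]
    intro k hk1 hk2
    cases hq : q k
    · rfl
    · exact absurd (h1 k hk1 hk2 hq) (by simp [hF k hk1 hk2])
  | some j =>
    rw [pvFind?_range'_some] at hF
    obtain ⟨hj1, hj2, hj3, hj4⟩ := hF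
    rw [Eq.comm, pvFind?_range'_some]
    refine ⟨hj1, hj2, h2 j hj1 hj2 hj3 hj4, fun k hk1 hk2 => ?_⟩
    cases hq : q k
    · rfl
    · exact absurd (h1 k hk1 (by omega) hq) (by simp [hj4 k hk1 hk2])

-- the walk crosses a level exactly when it first exceeds it
theorem pvCrossGe (f : Nat → Int)
    (hstep : ∀ j, -1 ≤ f (j+1) - f j ∧ f (j+1) - f j ≤ 1)
    (i j : Nat) (T : Int) (hij : i + 1 ≤ j)
    (hj : T ≤ f j - f i)
    (hprev : ∀ k, i+1 ≤ k → k < j → f k - f i < T) :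
    max T (-1) ≤ f j - f i ∧ f j - f i ≤ max T 1 := by
  cases j with
  | zero => omega
  | succ j' =>
    have hs := hstep j'
    rcases Nat.lt_or_ge i j' with h | h
    · have hp1 := hprev (i+1) (le_refl _) (by omega)
      have hp2 := hprev j' (by omega) (by omega)
      have hs0 := hstep i
      omega
    · have : j' = i := by omega
      subst this
      omega

theorem pvCrossLe (f : Nat → Int)
    (hstep : ∀ j, -1 ≤ f (j+1) - f j ∧ f (j+1) - f j ≤ 1)
    (i j : Nat) (U : Int) (hij : i + 1 ≤ j)
    (hj : f j - f i ≤ U)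
    (hprev : ∀ k, i+1 ≤ k → k < j → U < f k - f i) :
    min U (-1) ≤ f j - f i ∧ f j - f i ≤ min U 1 := by
  cases j with
  | zero => omega
  | succ j' =>
    have hs := hstep j'
    rcases Nat.lt_or_ge i j' with h | h
    · have hp1 := hprev (i+1) (le_refl _) (by omega)
      have hp2 := hprev j' (by omega) (by omega)
      have hs0 := hstep i
      omega
    · have : j' = i := by omega
      subst this
      omega

theorem pvStep (g : Char → Int) (hg : ∀ c, -1 ≤ g c ∧ g c ≤ 1) (cs : List Char) (j : Nat) :
    -1 ≤ pvRf g cs (j+1) - pvRf g cs j ∧ pvRf g cs (j+1) - pvRf g cs j ≤ 1 := by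
  unfold pvRf pvSum
  rw [List.take_add_one, List.map_append, List.sum_append]
  cases h : cs[j]? with
  | none => simp
  | some c => have := hg c; simp; omega

theorem pvDr_bnd (c : Char) : -1 ≤ pvDr c ∧ pvDr c ≤ 1 := by
  unfold pvDr; split_ifs <;> omega

theorem pvDc_bnd (c : Char) : -1 ≤ pvDc c ∧ pvDc c ≤ 1 := by
  unfold pvDc; split_ifs <;> omega

theorem pvBad_true_iff (n x y : Int) (cs : List Char) (i k : Nat) :
    pvBad n x y cs i k = true ↔
      (x + (pvRf pvDr cs k - pvRf pvDr cs i) < 0 ∨ n ≤ x + (pvRf pvDr cs k - pvRf pvDr cs i)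
        ∨ y + (pvRf pvDc cs k - pvRf pvDc cs i) < 0 ∨ n ≤ y + (pvRf pvDc cs k - pvRf pvDc cs i)) := by
  unfold pvBad
  simp
  omega

theorem pvBad_false_iff (n x y : Int) (cs : List Char) (i k : Nat) :
    pvBad n x y cs i k = false ↔
      (0 ≤ x + (pvRf pvDr cs k - pvRf pvDr cs i) ∧ x + (pvRf pvDr cs k - pvRf pvDr cs i) < n
        ∧ 0 ≤ y + (pvRf pvDc cs k - pvRf pvDc cs i) ∧ y + (pvRf pvDc cs k - pvRf pvDc cs i) < n) := by
  unfold pvBad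
  simp
  omega

theorem pvHit_iff (n x y : Int) (cs : List Char) (i j : Nat) :
    pvHit n x y cs i j = true ↔
      (∃ t : Int, ((max (n-x) (-1) ≤ t ∧ t < max (n-x) 1 + 1) ∨ (min (-x-1) (-1) ≤ t ∧ t < min (-x-1) 1 + 1))
          ∧ pvRf pvDr cs j = pvRf pvDr cs i + t) ∨
      (∃ t : Int, ((max (n-y) (-1) ≤ t ∧ t < max (n-y) 1 + 1) ∨ (min (-y-1) (-1) ≤ t ∧ t < min (-y-1) 1 + 1))
          ∧ pvRf pvDc cs j = pvRf pvDc cs i + t) := by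
  unfold pvHit pvTargetsGe pvTargetsLe
  simp [PySem.List.mem_pyRange_one]
  constructor
  · rintro ((⟨t, h1, h2⟩ | ⟨t, h1, h2⟩) | (⟨t, h1, h2⟩ | ⟨t, h1, h2⟩))
    · exact Or.inl ⟨t, Or.inl h1, h2⟩
    · exact Or.inl ⟨t, Or.inr h1, h2⟩
    · exact Or.inr ⟨t, Or.inl h1, h2⟩
    · exact Or.inr ⟨t, Or.inr h1, h2⟩
  · rintro (⟨t, h1 | h1, h2⟩ | ⟨t, h1 | h1, h2⟩)
    · exact Or.inl (Or.inl ⟨t, h1, h2⟩)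
    · exact Or.inl (Or.inr ⟨t, h1, h2⟩)
    · exact Or.inr (Or.inl ⟨t, h1, h2⟩)
    · exact Or.inr (Or.inr ⟨t, h1, h2⟩)

theorem pvHit_imp_bad (n x y : Int) (cs : List Char) (i j : Nat)
    (h : pvHit n x y cs i j = true) : pvBad n x y cs i j = true := by
  rw [pvHit_iff] at h
  rw [pvBad_true_iff]
  rcases h with ⟨t, ht, heq⟩ | ⟨t, ht, heq⟩ <;> omega

theorem pvBad_first_hit (n x y : Int) (cs : List Char) (i j : Nat)
    (hij : i + 1 ≤ j) (hj : pvBad n x y cs i j = true)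
    (hprev : ∀ k, i+1 ≤ k → k < j → pvBad n x y cs i k = false) :
    pvHit n x y cs i j = true := by
  rw [pvBad_true_iff] at hj
  have hprev' := fun k h1 h2 => (pvBad_false_iff n x y cs i k).mp (hprev k h1 h2)
  rw [pvHit_iff]
  rcases hj with h | h | h | h
  · have hc := pvCrossLe (pvRf pvDr cs) (pvStep pvDr pvDr_bnd cs) i j (-x-1) hij
      (by omega) (fun k h1 h2 => by have := hprev' k h1 h2; omega)
    exact Or.inl ⟨pvRf pvDr cs j - pvRf pvDr cs i, Or.inr (by omega), by ring⟩
  · have hc := pvCrossGe (pvRf pvDr cs) (pvStep pvDr pvDr_bnd cs) i j (n-x) hij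
      (by omega) (fun k h1 h2 => by have := hprev' k h1 h2; omega)
    exact Or.inl ⟨pvRf pvDr cs j - pvRf pvDr cs i, Or.inl (by omega), by ring⟩
  · have hc := pvCrossLe (pvRf pvDc cs) (pvStep pvDc pvDc_bnd cs) i j (-y-1) hij
      (by omega) (fun k h1 h2 => by have := hprev' k h1 h2; omega)
    exact Or.inr ⟨pvRf pvDc cs j - pvRf pvDc cs i, Or.inr (by omega), by ring⟩
  · have hc := pvCrossGe (pvRf pvDc cs) (pvStep pvDc pvDc_bnd cs) i j (n-y) hij
      (by omega) (fun k h1 h2 => by have := hprev' k h1 h2; omega)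
    exact Or.inr ⟨pvRf pvDc cs j - pvRf pvDc cs i, Or.inl (by omega), by ring⟩

-- scanl computes the prefix sums
theorem pvScanl_getD (g : Char → Int) :
    ∀ (l : List Char) (a : Int) (j : Nat), j ≤ l.length →
      (l.scanl (fun s ch => s + g ch) a).getD j 0 = a + pvSum g (l.take j) := by
  intro l
  induction l with
  | nil =>
    intro a j hj
    have : j = 0 := by simpa using hj
    subst this
    simp [pvSum]
  | cons ch rest ih =>
    intro a j hj
    rw [List.scanl_cons]
    cases j with
    | zero => simp [pvSum]
    | succ j =>
      simp only [List.getD_cons_succ, List.take_succ_cons]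
      rw [ih (a + g ch) j (by simpa using hj)]
      unfold pvSum
      simp
      ring

-- prefix-sum over a suffix window
theorem pvSum_drop_take (g : Char → Int) (cs : List Char) (i k : Nat) :
    pvSum g ((cs.drop i).take k) = pvRf g cs (i + k) - pvRf g cs i := by
  unfold pvRf pvSum
  rw [List.take_add, List.map_append, List.sum_append]
  ring

-- A's inner loop characterised by the first failing step
theorem pvMove_cons (d : Char) (x y : Int) (t : List Int) :
    pvMove d (x :: y :: t) = (x + pvDr d) :: (y + pvDc d) :: t := by
  unfold pvMove pvDr pvDc
  split_ifs <;> simp_all [pysem] <;> omega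

theorem pvBadStep_cons_zero (n x y : Int) (d : Char) (rest : List Char) :
    pvBadStep n x y (d :: rest) 0 =
      !(decide (0 ≤ x + pvDr d) && decide (x + pvDr d < n)
        && decide (0 ≤ y + pvDc d) && decide (y + pvDc d < n)) := by
  unfold pvBadStep pvSum
  simp

theorem pvBadStep_cons_succ (n x y : Int) (d : Char) (rest : List Char) (k : Nat) :
    pvBadStep n x y (d :: rest) (k+1) = pvBadStep n (x + pvDr d) (y + pvDc d) rest k := by
  unfold pvBadStep pvSum
  simp only [List.take_succ_cons, List.map_cons, List.sum_cons, ← add_assoc]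

theorem pvAInner_char (n : Int) :
    ∀ (l : List Char) (x y : Int) (t : List Int),
      pvAInner n (x :: y :: t) l =
        match (List.range l.length).find? (fun k => pvBadStep n x y l k) with
        | some k => (k : Int)
        | none => (l.length : Int) := by
  intro l
  induction l with
  | nil => intro x y t; rfl
  | cons d rest ih =>
    intro x y t
    have hL : pvAInner n (x :: y :: t) (d :: rest) =
        if (0 ≤ x + pvDr d ∧ x + pvDr d < n ∧ 0 ≤ y + pvDc d ∧ y + pvDc d < n)
        then 1 + pvAInner n ((x + pvDr d) :: (y + pvDc d) :: t) rest else 0 := by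
      simp only [pvAInner, pvMove_cons]
      simp [pysem]
    rw [hL]
    have hlen : (d :: rest).length = rest.length + 1 := rfl
    rw [hlen, List.range_succ_eq_map]
    by_cases hc : (0 ≤ x + pvDr d ∧ x + pvDr d < n ∧ 0 ≤ y + pvDc d ∧ y + pvDc d < n)
    · rw [if_pos hc]
      rw [List.find?_cons_of_neg (by simp [pvBadStep_cons_zero]; omega)]
      rw [List.find?_map]
      rw [pvFind?_congr ((List.range rest.length)) _
            (fun k => pvBadStep n (x + pvDr d) (y + pvDc d) rest k)
            (fun k _ => by simpa [Function.comp] using pvBadStep_cons_succ n x y d rest k)]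
      rw [ih (x + pvDr d) (y + pvDc d) t]
      cases hF : (List.range rest.length).find? (fun k => pvBadStep n (x + pvDr d) (y + pvDc d) rest k) with
      | none => simp; push_cast; ring
      | some k => simp; push_cast; ring
    · rw [if_neg hc]
      rw [List.find?_cons_of_pos (by simp [pvBadStep_cons_zero]; omega)]
      simp

-- dict invariant
theorem pvInv_empty (Rl : List Int) (m : Nat) : pvInv Rl m m PySem.Dict.empty := by
  intro v
  simp [PySem.Dict.get?_empty]

theorem pvInv_insert (Rl : List Int) (m k : Nat) (d : PySem.Dict Int Int)
    (hk : k < m) (h : pvInv Rl m (k+1) d) :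
    pvInv Rl m k (d.insert (Rl.getD (k+1) 0) ((k : Int) + 1)) := by
  intro v
  rw [PySem.Dict.get?_insert]
  have hrange : List.range' (k+1) (m-k) = (k+1) :: List.range' (k+2) (m-(k+1)) := by
    have h1 : m - k = (m - (k+1)) + 1 := by omega
    rw [h1, List.range'_succ]
  rw [hrange]
  split_ifs with hv
  · rw [List.find?_cons_of_pos (by simp [hv])]
    simp
  · rw [List.find?_cons_of_neg (by simp; exact fun h => hv h.symm)]
    exact h v

-- the candidate minimum equals the first hit
theorem pvHit_any_iff (n x y : Int) (cs : List Char) (k j : Nat) :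
    pvHit n x y cs k j = true ↔
      (∃ t ∈ pvTargetsGe (n-x) ++ pvTargetsLe (-x-1), pvRf pvDr cs j = pvRf pvDr cs k + t) ∨
      (∃ t ∈ pvTargetsGe (n-y) ++ pvTargetsLe (-y-1), pvRf pvDc cs j = pvRf pvDc cs k + t) := by
  unfold pvHit
  simp
  constructor
  · rintro ((⟨t, h1, h2⟩ | ⟨t, h1, h2⟩) | (⟨t, h1, h2⟩ | ⟨t, h1, h2⟩))
    · exact Or.inl ⟨t, Or.inl h1, h2⟩
    · exact Or.inl ⟨t, Or.inr h1, h2⟩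
    · exact Or.inr ⟨t, Or.inl h1, h2⟩
    · exact Or.inr ⟨t, Or.inr h1, h2⟩
  · rintro (⟨t, h1 | h1, h2⟩ | ⟨t, h1 | h1, h2⟩)
    · exact Or.inl (Or.inl ⟨t, h1, h2⟩)
    · exact Or.inl (Or.inr ⟨t, h1, h2⟩)
    · exact Or.inr (Or.inl ⟨t, h1, h2⟩)
    · exact Or.inr (Or.inr ⟨t, h1, h2⟩)

theorem pvSide_mem (cs : List Char) (Rl : List Int) (g : Char → Int) (m k : Nat)
    (ts : List Int) (fR : PySem.Dict Int Int) (hk : k < m)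
    (hR : ∀ j, j ≤ m → Rl.getD j 0 = pvRf g cs j) (hfR : pvInv Rl m k fR) :
    ∀ w, w ∈ ts.filterMap (fun t => fR.get? (Rl.getD k 0 + t)) →
      ∃ jv : Nat, w = (jv : Int) ∧ k+1 ≤ jv ∧ jv < k+1+(m-k) ∧
        ∃ t ∈ ts, pvRf g cs jv = pvRf g cs k + t := by
  intro w hw
  rw [List.mem_filterMap] at hw
  obtain ⟨t, ht, hget⟩ := hw
  rw [hfR (Rl.getD k 0 + t)] at hget
  cases hfind : (List.range' (k+1) (m-k)).find? (fun j => Rl.getD j 0 == Rl.getD k 0 + t) with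
  | none => rw [hfind] at hget; cases hget
  | some jv =>
    rw [hfind] at hget
    have hw : (jv : Int) = w := by simpa using hget
    rw [pvFind?_range'_some] at hfind
    obtain ⟨hb1, hb2, hpred, -⟩ := hfind
    rw [beq_iff_eq] at hpred
    rw [hR jv (by omega), hR k (by omega)] at hpred
    exact ⟨jv, hw.symm, hb1, hb2, t, ht, hpred⟩

theorem pvSide_hit (cs : List Char) (Rl : List Int) (g : Char → Int) (m k : Nat)
    (ts : List Int) (fR : PySem.Dict Int Int) (hk : k < m)
    (hR : ∀ j, j ≤ m → Rl.getD j 0 = pvRf g cs j) (hfR : pvInv Rl m k fR) :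
    ∀ jv : Nat, k+1 ≤ jv → jv < k+1+(m-k) →
      (∃ t ∈ ts, pvRf g cs jv = pvRf g cs k + t) →
      ∃ w ∈ ts.filterMap (fun t => fR.get? (Rl.getD k 0 + t)), w ≤ (jv : Int) := by
  intro jv h1 h2 ⟨t, ht, heq⟩
  have hpredjv : (Rl.getD jv 0 == Rl.getD k 0 + t) = true := by
    rw [beq_iff_eq, hR jv (by omega), hR k (by omega)]
    exact heq
  cases hfind : (List.range' (k+1) (m-k)).find? (fun j => Rl.getD j 0 == Rl.getD k 0 + t) with
  | none =>
    rw [pvFind?_range'_none] at hfind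
    rw [hfind jv h1 h2] at hpredjv
    exact absurd hpredjv Bool.false_ne_true
  | some jv' =>
    have hspec := (pvFind?_range'_some _ _ _ _).mp hfind
    obtain ⟨hc1, hc2, hc3, hc4⟩ := hspec
    have hle : jv' ≤ jv := by
      by_contra hlt
      rw [hc4 jv h1 (by omega)] at hpredjv
      exact absurd hpredjv Bool.false_ne_true
    refine ⟨(jv' : Int), ?_, by exact_mod_cast hle⟩
    rw [List.mem_filterMap]
    exact ⟨t, ht, by rw [hfR (Rl.getD k 0 + t), hfind]; rfl⟩

theorem pvCands_min (n x y : Int) (cs : List Char) (Rl Cl : List Int) (m k : Nat)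
    (hm : m = cs.length) (hk : k < m)
    (hR : ∀ j, j ≤ m → Rl.getD j 0 = pvRf pvDr cs j)
    (hC : ∀ j, j ≤ m → Cl.getD j 0 = pvRf pvDc cs j)
    (fR fC : PySem.Dict Int Int) (hfR : pvInv Rl m k fR) (hfC : pvInv Cl m k fC) :
    PySem.List.min?
      ((pvTargetsGe (n - x) ++ pvTargetsLe (-x - 1)).filterMap
          (fun t => fR.get? (Rl.getD k 0 + t)) ++
       (pvTargetsGe (n - y) ++ pvTargetsLe (-y - 1)).filterMap
          (fun t => fC.get? (Cl.getD k 0 + t))) (fun j => j)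
      = ((List.range' (k+1) (m - k)).find? (fun j => pvHit n x y cs k j)).map
          (fun j => (j : Int)) := by
  have memCands : ∀ w, w ∈ ((pvTargetsGe (n - x) ++ pvTargetsLe (-x - 1)).filterMap
          (fun t => fR.get? (Rl.getD k 0 + t)) ++
        (pvTargetsGe (n - y) ++ pvTargetsLe (-y - 1)).filterMap
          (fun t => fC.get? (Cl.getD k 0 + t))) →
      ∃ jv : Nat, w = (jv : Int) ∧ k+1 ≤ jv ∧ jv < k+1+(m-k) ∧ pvHit n x y cs k jv = true := by
    intro w hw
    rw [List.mem_append] at hw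
    rcases hw with hw | hw
    · obtain ⟨jv, h1, h2, h3, h4⟩ := pvSide_mem cs Rl pvDr m k _ fR hk hR hfR w hw
      exact ⟨jv, h1, h2, h3, (pvHit_any_iff n x y cs k jv).mpr (Or.inl h4)⟩
    · obtain ⟨jv, h1, h2, h3, h4⟩ := pvSide_mem cs Cl pvDc m k _ fC hk hC hfC w hw
      exact ⟨jv, h1, h2, h3, (pvHit_any_iff n x y cs k jv).mpr (Or.inr h4)⟩
  have hitCands : ∀ jv : Nat, k+1 ≤ jv → jv < k+1+(m-k) → pvHit n x y cs k jv = true →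
      ∃ w ∈ ((pvTargetsGe (n - x) ++ pvTargetsLe (-x - 1)).filterMap
          (fun t => fR.get? (Rl.getD k 0 + t)) ++
        (pvTargetsGe (n - y) ++ pvTargetsLe (-y - 1)).filterMap
          (fun t => fC.get? (Cl.getD k 0 + t))), w ≤ (jv : Int) := by
    intro jv h1 h2 hhit
    rcases (pvHit_any_iff n x y cs k jv).mp hhit with h | h
    · obtain ⟨w, hw, hle⟩ := pvSide_hit cs Rl pvDr m k _ fR hk hR hfR jv h1 h2 h
      exact ⟨w, List.mem_append_left _ hw, hle⟩
    · obtain ⟨w, hw, hle⟩ := pvSide_hit cs Cl pvDc m k _ fC hk hC hfC jv h1 h2 h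
      exact ⟨w, List.mem_append_right _ hw, hle⟩
  cases hF : (List.range' (k+1) (m - k)).find? (fun j => pvHit n x y cs k j) with
  | none =>
    rw [pvFind?_range'_none] at hF
    have hnil : ((pvTargetsGe (n - x) ++ pvTargetsLe (-x - 1)).filterMap
          (fun t => fR.get? (Rl.getD k 0 + t)) ++
        (pvTargetsGe (n - y) ++ pvTargetsLe (-y - 1)).filterMap
          (fun t => fC.get? (Cl.getD k 0 + t))) = [] := by
      rw [List.eq_nil_iff_forall_not_mem]
      intro w hw
      obtain ⟨jv, _, h2, h3, h4⟩ := memCands w hw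
      exact absurd h4 (by simp [hF jv h2 h3])
    rw [hnil]
    rfl
  | some j0 =>
    have hspec := (pvFind?_range'_some _ _ _ _).mp hF
    obtain ⟨hs1, hs2, hs3, hs4⟩ := hspec
    obtain ⟨w0, hw0, hle0⟩ := hitCands j0 hs1 hs2 hs3
    have hw0eq : w0 = (j0 : Int) := by
      obtain ⟨jv, rfl, h2, h3, h4⟩ := memCands w0 hw0
      have : ¬ jv < j0 := fun hlt => absurd h4 (by simp [hs4 jv h2 hlt])
      have : j0 ≤ jv := by omega
      have : (j0 : Int) ≤ (jv : Int) := by exact_mod_cast this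
      omega
    subst hw0eq
    cases hmin : PySem.List.min? ((pvTargetsGe (n - x) ++ pvTargetsLe (-x - 1)).filterMap
          (fun t => fR.get? (Rl.getD k 0 + t)) ++
        (pvTargetsGe (n - y) ++ pvTargetsLe (-y - 1)).filterMap
          (fun t => fC.get? (Cl.getD k 0 + t))) (fun j => j) with
    | none =>
      rw [PySem.List.min?_eq_none_iff] at hmin
      rw [hmin] at hw0
      cases hw0
    | some z =>
      have hzmem := PySem.List.min?_mem hmin
      have hzmin := PySem.List.min?_isMin hmin
      have hz1 : z ≤ (j0 : Int) := hzmin _ hw0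
      have hz2 : (j0 : Int) ≤ z := by
        obtain ⟨jz, rfl, h2, h3, h4⟩ := memCands z hzmem
        have : ¬ jz < j0 := fun hlt => absurd h4 (by simp [hs4 jz h2 hlt])
        exact_mod_cast by omega
      have : z = (j0 : Int) := le_antisymm hz1 hz2
      simp [this]

theorem pvBLoop_eq (n x y : Int) (cs : List Char) (Rl Cl : List Int) (m : Nat)
    (hm : m = cs.length)
    (hR : ∀ j, j ≤ m → Rl.getD j 0 = pvRf pvDr cs j)
    (hC : ∀ j, j ≤ m → Cl.getD j 0 = pvRf pvDc cs j) :
    ∀ (k : Nat) (fR fC : PySem.Dict Int Int) (acc : List Int), k ≤ m →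
      pvInv Rl m k fR → pvInv Cl m k fC →
      pvBLoop m Rl Cl (pvTargetsGe (n - x) ++ pvTargetsLe (-x - 1))
          (pvTargetsGe (n - y) ++ pvTargetsLe (-y - 1)) k fR fC acc
        = (List.range k).map (pvBfun n x y cs m) ++ acc := by
  intro k
  induction k with
  | zero => intro fR fC acc _ _ _; simp [pvBLoop]
  | succ k ih =>
    intro fR fC acc hk hfR hfC
    have hfR' := pvInv_insert Rl m k fR (by omega) hfR
    have hfC' := pvInv_insert Cl m k fC (by omega) hfC
    simp only [pvBLoop]
    rw [pvCands_min n x y cs Rl Cl m k hm (by omega) hR hC _ _ hfR' hfC']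
    rw [ih _ _ _ (by omega) hfR' hfC']
    rw [List.range_succ, List.map_append]
    simp only [List.map_cons, List.map_nil, List.append_assoc, List.cons_append,
      List.nil_append]
    rfl

theorem pvPer_i (n x y : Int) (t : List Int) (cs : List Char) (i : Nat)
    (hi : i < cs.length) :
    pvAInner n (x :: y :: t) (cs.drop i) = pvBfun n x y cs cs.length i := by
  rw [pvAInner_char]
  have hlen : (cs.drop i).length = cs.length - i := List.length_drop
  have hcong : ∀ k ∈ List.range (cs.length - i),
      (fun k => pvBadStep n x y (cs.drop i) k) k = pvBad n x y cs i (i+1+k) := by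
    intro k _
    unfold pvBadStep pvBad
    simp only []
    rw [pvSum_drop_take, pvSum_drop_take]
    have hidx : i + (k+1) = i+1+k := by omega
    rw [hidx]
  rw [hlen, pvFind?_congr _ _ _ hcong]
  have hshift : (List.range' (i+1) (cs.length - i)).find? (fun j => pvBad n x y cs i j)
      = ((List.range (cs.length - i)).find? (fun k => pvBad n x y cs i (i+1+k))).map
          (fun k => i+1+k) := by
    rw [List.range'_eq_map_range, List.find?_map]
    rfl
  have hBH : (List.range' (i+1) (cs.length - i)).find? (fun j => pvBad n x y cs i j)
      = (List.range' (i+1) (cs.length - i)).find? (fun j => pvHit n x y cs i j) :=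
    pvFind?_range'_congr (i+1) (cs.length - i) _ _
      (fun j _ _ hq => pvHit_imp_bad n x y cs i j hq)
      (fun j hj1 _ hp hprev => pvBad_first_hit n x y cs i j hj1 hp hprev)
  unfold pvBfun
  rw [← hBH, hshift]
  cases hFK : (List.range (cs.length - i)).find? (fun k => pvBad n x y cs i (i+1+k)) with
  | none =>
    simp
    omega
  | some k =>
    simp
    omega

-- ===== VERDICT (by name: the statement is the Claim_ definition above) =====
theorem executeInstructions_spec : Claim_equal_executeInstructions := by
  intro n startPos s _ hpre
  unfold Spec_executeInstructions executeInstructions executeInstructions_alt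
  simp only []
  by_cases hm : s.toList.length = 0
  · rw [if_pos hm, hm]
    simp
  · rw [if_neg hm]
    have hsp : 2 ≤ startPos.length := by
      rcases hpre with h | h
      · exact absurd h hm
      · exact h
    obtain ⟨x, y, t, rfl⟩ : ∃ x y t, startPos = x :: y :: t := by
      match startPos, hsp with
      | x :: y :: t, _ => exact ⟨x, y, t, rfl⟩
    have hgx : PySem.List.pyGetD (x :: y :: t) 0 0 = x := by simp [pysem]
    have hgy : PySem.List.pyGetD (x :: y :: t) 1 0 = y := by simp [pysem]
    rw [hgx, hgy]
    have hR : ∀ j, j ≤ s.toList.length →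
        (s.toList.scanl (fun a ch => a + pvDr ch) 0).getD j 0 = pvRf pvDr s.toList j := by
      intro j hj
      rw [pvScanl_getD pvDr s.toList 0 j hj]
      unfold pvRf
      ring
    have hC : ∀ j, j ≤ s.toList.length →
        (s.toList.scanl (fun a ch => a + pvDc ch) 0).getD j 0 = pvRf pvDc s.toList j := by
      intro j hj
      rw [pvScanl_getD pvDc s.toList 0 j hj]
      unfold pvRf
      ring
    rw [pvBLoop_eq n x y s.toList _ _ s.toList.length rfl hR hC s.toList.length
      PySem.Dict.empty PySem.Dict.empty [] le_rfl (pvInv_empty _ _) (pvInv_empty _ _)]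
    rw [List.append_nil]
    exact List.map_congr_left (fun i hi => pvPer_i n x y t s.toList i (List.mem_range.mp hi))
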